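-- pv_equiv track=rewrite | github.com/NeuralNacho/ChessEngine | test.py | fen_row
-- ===== SOURCE A (Python) =====
-- def fen_row(fen, row):
--     i = 0
--     x = 0
--     t = 0
--     while i < row:
--         y = fen[x]
--         if y == "/":
--             t = x + 1
--             i = i + 1
--         x = x + 1
--     return t
-- ===== SOURCE B (Python) =====
-- def fen_row(fen, row):
--     positions = [j + 1 for j, c in enumerate(fen) if c == '/']
--     if row <= 0:
--         return 0
--     return positions[row - 1]
-- ===== Notes on version B (the rewrite author's own statement) =====
-- stated objective: simpler
-- what changed: Replaces the manual while-loop with three counters by a one-line comprehension collecting all slash-follow positions and a direct index into that list.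
import Mathlib
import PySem

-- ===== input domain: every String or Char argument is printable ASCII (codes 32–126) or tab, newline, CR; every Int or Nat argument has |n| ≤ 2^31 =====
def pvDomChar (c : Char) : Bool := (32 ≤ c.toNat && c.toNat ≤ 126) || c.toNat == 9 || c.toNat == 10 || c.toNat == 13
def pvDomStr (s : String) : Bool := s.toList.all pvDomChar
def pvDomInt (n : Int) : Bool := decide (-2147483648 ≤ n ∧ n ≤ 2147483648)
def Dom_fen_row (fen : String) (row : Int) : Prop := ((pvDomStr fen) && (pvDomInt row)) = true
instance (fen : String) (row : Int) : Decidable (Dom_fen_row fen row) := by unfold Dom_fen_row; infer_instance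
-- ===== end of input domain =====

-- B is simpler: one comprehension collecting slash-follow positions plus a direct list index,
-- instead of A's while-loop with three counters.

-- ===== PORT A =====
-- A's while loop: state (i, x, t); y = fen[x] raises when x runs off the end (excluded by Pre_),
-- the port returns the current t there (value never claimed: outside Pre_).
def fenRowLoopA : List Char → Int → Int → Int → Int → Int
  | cs, row, i, x, t =>
    if i < row then
      match cs with
      | [] => t
      | y :: rest =>
        if y = '/' then fenRowLoopA rest row (i + 1) (x + 1) (x + 1)
        else fenRowLoopA rest row i (x + 1) t
    else t

def fen_row (fen : String) (row : Int) : Int :=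
  fenRowLoopA fen.toList row 0 0 0

-- ===== PORT B =====
-- positions = [j + 1 for j, c in enumerate(fen) if c == '/']; return 0 if row <= 0 else positions[row-1]
-- (positions[row-1] raises IndexError in Python when out of range — excluded by Pre_; .getD 0 there.)
def fen_row_alt (fen : String) (row : Int) : Int :=
  let positions : List Int :=
    (PySem.List.enumerate fen.toList).filterMap
      (fun jc => if jc.2 = '/' then some (jc.1 + 1) else none)
  if row ≤ 0 then 0
  else (PySem.List.pyGet? positions (row - 1)).getD 0

-- ===== PRECONDITION & SPEC =====
-- Pre_ excludes exactly the inputs on which A raises IndexError (fewer than `row` slashes in fen);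
-- B raises IndexError on the same inputs.
def Pre_fen_row (fen : String) (row : Int) : Prop :=
  row ≤ (fen.toList.count '/' : Int)
instance (fen : String) (row : Int) : Decidable (Pre_fen_row fen row) := by
  unfold Pre_fen_row; infer_instance

def pvWitness_fen_row : String × Int := ("rnb/ppp/8", 2)

def Spec_fen_row (fen : String) (row : Int) (out : Int) : Prop := out = fen_row_alt fen row
instance (fen : String) (row : Int) (out : Int) : Decidable (Spec_fen_row fen row out) := by
  unfold Spec_fen_row; infer_instance

-- ===== CLAIM (what is proved, stated in full; the proofs are below) =====
def Claim_equal_fen_row : Prop := ∀ (fen : String) (row : Int), Dom_fen_row fen row → Pre_fen_row fen row → Spec_fen_row fen row (fen_row fen row)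

-- ===== LEMMAS AND PROOFS =====

-- positions (as Int) of '/' in a char list (proof-side characterisation of B's comprehension)
def slashPos : List Char → List Int
  | [] => []
  | c :: cs => if c = '/' then 0 :: (slashPos cs).map (· + 1) else (slashPos cs).map (· + 1)

theorem length_slashPos (cs : List Char) : (slashPos cs).length = cs.count '/' := by
  induction cs with
  | nil => simp [slashPos]
  | cons c cs ih =>
    by_cases h : c = '/' <;> simp [slashPos, h, ih]

-- B's comprehension equals slashPos shifted by the enumerate start
theorem filterMap_enumerate_eq (cs : List Char) (s : Int) :
    (PySem.List.enumerate cs s).filterMap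
        (fun jc => if jc.2 = '/' then some (jc.1 + 1) else none)
      = (slashPos cs).map (fun n => s + n + 1) := by
  induction cs generalizing s with
  | nil => simp [PySem.List.enumerate_nil, slashPos]
  | cons c cs ih =>
    by_cases h : c = '/'
    · subst h
      simp only [PySem.List.enumerate_cons, List.filterMap_cons, ih, slashPos, reduceIte,
        List.map_cons, List.map_map]
      refine List.cons_eq_cons.mpr ⟨by ring, ?_⟩
      exact List.map_congr_left (fun n _ => by simp [Function.comp]; ring)
    · simp only [PySem.List.enumerate_cons, List.filterMap_cons, ih, slashPos, h,
        reduceIte, List.map_map]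
      exact List.map_congr_left (fun n _ => by simp [Function.comp]; ring)

-- A's loop computes x + slashPos[k-1] + 1 where k = row - i slashes remain to be seen
theorem loopA_eq (cs : List Char) (k : Nat) :
    ∀ (row i x t : Int), row - i = (k : Int) → 0 < k → k ≤ (slashPos cs).length →
      fenRowLoopA cs row i x t = x + (slashPos cs).getD (k - 1) 0 + 1 := by
  induction cs generalizing k with
  | nil => intro row i x t hk hk0 hle; simp [slashPos] at hle; omega
  | cons c cs ih =>
    intro row i x t hk hk0 hle
    have hi : i < row := by omega
    rw [fenRowLoopA.eq_def]
    simp only [if_pos hi]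
    by_cases h : c = '/'
    · subst h
      simp only [reduceIte]
      have hsp : slashPos ('/' :: cs) = 0 :: (slashPos cs).map (· + 1) := by
        simp [slashPos]
      rcases Nat.eq_or_lt_of_le hk0 with h1 | h1
      · have hrow : ¬ (i + 1 < row) := by omega
        rw [fenRowLoopA.eq_def]
        simp only [if_neg hrow, hsp, ← h1]
        simp
      · have hk' : row - (i + 1) = ((k - 1 : Nat) : Int) := by omega
        have hlen : k - 1 ≤ (slashPos cs).length := by
          rw [hsp] at hle; simp at hle; omega
        rw [ih (k - 1) row (i + 1) (x + 1) (x + 1) hk' (by omega) hlen, hsp]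
        have hidx : k - 1 - 1 < (slashPos cs).length := by omega
        have hstep : (0 :: (slashPos cs).map (· + 1)).getD (k - 1) 0
            = (slashPos cs).getD (k - 1 - 1) 0 + 1 := by
          have hk1 : k - 1 = (k - 1 - 1) + 1 := by omega
          rw [hk1]
          simp [List.getD, List.getElem?_map, List.getElem?_eq_getElem hidx]
        rw [hstep]; ring
    · simp only [if_neg h]
      have hsp : slashPos (c :: cs) = (slashPos cs).map (· + 1) := by
        simp [slashPos, h]
      have hle' : k ≤ (slashPos cs).length := by rw [hsp] at hle; simpa using hle
      rw [ih k row i (x + 1) t hk hk0 hle', hsp]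
      have hidx : k - 1 < (slashPos cs).length := by omega
      have hstep : ((slashPos cs).map (· + 1)).getD (k - 1) 0
          = (slashPos cs).getD (k - 1) 0 + 1 := by
        simp [List.getD, List.getElem?_map, List.getElem?_eq_getElem hidx]
      rw [hstep]; ring

-- ===== VERDICT (by name: the statement is the Claim_ definition above) =====
theorem fen_row_spec : Claim_equal_fen_row := by
  intro fen row _ hpre
  unfold Spec_fen_row fen_row fen_row_alt
  rw [filterMap_enumerate_eq]
  by_cases hr : row ≤ 0
  · rw [fenRowLoopA.eq_def]
    simp [hr, show ¬ ((0:Int) < row) by omega]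
  · have hrpos : 0 < row := by omega
    set k : Nat := row.toNat with hk
    have hkrow : (k : Int) = row := Int.toNat_of_nonneg (by omega)
    have hk0 : 0 < k := by omega
    have hle : k ≤ (slashPos fen.toList).length := by
      rw [length_slashPos]
      unfold Pre_fen_row at hpre
      omega
    rw [loopA_eq fen.toList k row 0 0 0 (by omega) hk0 hle]
    simp only [if_neg hr]
    have hidx' : k - 1 < (slashPos fen.toList).length := by omega
    have hget : PySem.List.pyGet?
        ((slashPos fen.toList).map (fun n => (0:Int) + n + 1)) (row - 1)
        = some ((0:Int) + (slashPos fen.toList).getD (k-1) 0 + 1) := by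
      have h1 : row - 1 = ((k - 1 : Nat) : Int) := by omega
      rw [h1, PySem.List.pyGet?_natCast]
      simp [List.getElem?_map, List.getElem?_eq_getElem hidx', List.getD]
    rw [hget]
    simp
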